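-- pv_equiv track=rewrite | github.com/sreevarshan-xenoz/xencode | xencode/warp_ai_integration.py | _get_fallback_suggestions
-- ===== SOURCE A (Python) =====
-- from typing import Dict, List, Optional, Any, Tuple
--
-- def _get_fallback_suggestions(recent_commands: List[str]) -> List[str]:
--     """Fallback suggestions when AI fails"""
--     fallback = []
--
--     # Simple pattern-based suggestions
--     if any("git" in cmd for cmd in recent_commands):
--         fallback.extend(["git status", "git add .", "git commit"])
--
--     if any("docker" in cmd for cmd in recent_commands):
--         fallback.extend(["docker ps", "docker images"])
--
--     if any("npm" in cmd for cmd in recent_commands):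
--         fallback.extend(["npm install", "npm run build"])
--
--     # Default suggestions
--     fallback.extend(["ls -la", "pwd", "git status"])
--
--     return fallback[:5]
-- ===== SOURCE B (Python) =====
-- # Precompute all 8 possible answers (indexed by which keywords occur), then
-- # one early-exiting scan sets three flags and a single table lookup returns.
-- _GIT = ["git status", "git add .", "git commit"]
-- _DOCKER = ["docker ps", "docker images"]
-- _NPM = ["npm install", "npm run build"]
-- _DEFAULT = ["ls -la", "pwd", "git status"]
--
-- _TABLE = [
--     ((_GIT if i & 1 else []) + (_DOCKER if i & 2 else []) + (_NPM if i & 4 else []) + _DEFAULT)[:5]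
--     for i in range(8)
-- ]
--
--
-- def _get_fallback_suggestions(recent_commands):
--     g = d = n = False
--     for cmd in recent_commands:
--         g = g or "git" in cmd
--         d = d or "docker" in cmd
--         n = n or "npm" in cmd
--         if g and d and n:
--             break
--     return _TABLE[(1 if g else 0) + (2 if d else 0) + (4 if n else 0)]
-- ===== Notes on version B (the rewrite author's own statement) =====
-- stated objective: alternative
-- what changed: B precomputes all 8 possible answers (already truncated to 5) in a table indexed by which keywords occur, and replaces A's three any()-scans plus conditional concatenation and slicing by one early-exiting flag-collecting pass and a single table lookup.
import Mathlib
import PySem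

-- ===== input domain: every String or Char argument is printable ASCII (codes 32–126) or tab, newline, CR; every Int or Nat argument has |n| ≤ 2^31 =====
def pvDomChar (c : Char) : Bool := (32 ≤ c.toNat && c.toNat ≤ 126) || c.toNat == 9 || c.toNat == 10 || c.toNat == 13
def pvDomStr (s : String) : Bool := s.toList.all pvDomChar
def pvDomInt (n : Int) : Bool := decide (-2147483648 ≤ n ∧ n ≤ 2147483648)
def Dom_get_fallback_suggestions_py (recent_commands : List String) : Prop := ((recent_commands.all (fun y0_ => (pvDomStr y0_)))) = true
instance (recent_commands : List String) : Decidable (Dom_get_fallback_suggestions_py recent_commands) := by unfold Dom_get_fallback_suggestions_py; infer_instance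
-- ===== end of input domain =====

-- B precomputes the 8 possible answers in a table and replaces A's conditional
-- concatenation + truncation by one early-exiting flag scan and a table lookup
-- (alternative decomposition, same asymptotic cost).

-- ===== PORT A =====
def get_fallback_suggestions_py (recent_commands : List String) : List String :=
  let fallback : List String := []
  let fallback := if recent_commands.any (fun cmd => PySem.Str.isIn "git" cmd)
    then fallback ++ ["git status", "git add .", "git commit"] else fallback
  let fallback := if recent_commands.any (fun cmd => PySem.Str.isIn "docker" cmd)
    then fallback ++ ["docker ps", "docker images"] else fallback
  let fallback := if recent_commands.any (fun cmd => PySem.Str.isIn "npm" cmd)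
    then fallback ++ ["npm install", "npm run build"] else fallback
  let fallback := fallback ++ ["ls -la", "pwd", "git status"]
  PySem.List.slice fallback none (some 5)

-- ===== PORT B =====
-- the precomputed table _TABLE of Source B, index i = g + 2*d + 4*n (a list literal,
-- exactly the 8 values the Python comprehension produces at module load)
def pvTable : List (List String) :=
  [["ls -la", "pwd", "git status"],
   ["git status", "git add .", "git commit", "ls -la", "pwd"],
   ["docker ps", "docker images", "ls -la", "pwd", "git status"],
   ["git status", "git add .", "git commit", "docker ps", "docker images"],
   ["npm install", "npm run build", "ls -la", "pwd", "git status"],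
   ["git status", "git add .", "git commit", "npm install", "npm run build"],
   ["docker ps", "docker images", "npm install", "npm run build", "ls -la"],
   ["git status", "git add .", "git commit", "docker ps", "docker images"]]

-- Source B's flag-collecting loop with its early break once all three flags are set
def pvFlagLoop : List String → Bool → Bool → Bool → Bool × Bool × Bool
  | [], g, d, n => (g, d, n)
  | cmd :: rest, g, d, n =>
    let g := g || PySem.Str.isIn "git" cmd
    let d := d || PySem.Str.isIn "docker" cmd
    let n := n || PySem.Str.isIn "npm" cmd
    if g && d && n then (g, d, n) else pvFlagLoop rest g d n

def get_fallback_suggestions_py_alt (recent_commands : List String) : List String :=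
  let (g, d, n) := pvFlagLoop recent_commands false false false
  let idx : Int := (if g then 1 else 0) + (if d then 2 else 0) + (if n then 4 else 0)
  match PySem.List.pyGet? pvTable idx with
  | some l => l
  | none => []   -- unreachable: idx ∈ [0,7]

-- ===== PRECONDITION & SPEC =====
def Spec_get_fallback_suggestions_py (recent_commands : List String) (out : List String) : Prop := out = get_fallback_suggestions_py_alt recent_commands
instance (recent_commands : List String) (out : List String) : Decidable (Spec_get_fallback_suggestions_py recent_commands out) := by unfold Spec_get_fallback_suggestions_py; infer_instance

-- ===== CLAIM (what is proved, stated in full; the proofs are below) =====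
def Claim_equal_get_fallback_suggestions_py : Prop := ∀ (recent_commands : List String), Dom_get_fallback_suggestions_py recent_commands → Spec_get_fallback_suggestions_py recent_commands (get_fallback_suggestions_py recent_commands)

-- ===== LEMMAS AND PROOFS =====
-- the early-exiting flag loop computes exactly the three any()-scans of A
theorem pvFlagLoop_eq (rc : List String) (g d n : Bool) :
    pvFlagLoop rc g d n
      = (g || rc.any (fun c => PySem.Str.isIn "git" c),
         d || rc.any (fun c => PySem.Str.isIn "docker" c),
         n || rc.any (fun c => PySem.Str.isIn "npm" c)) := by
  induction rc generalizing g d n with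
  | nil => simp [pvFlagLoop]
  | cons c rest ih =>
    simp only [pvFlagLoop, List.any_cons]
    split_ifs with h
    · simp only [Bool.and_eq_true] at h
      obtain ⟨⟨hg, hd⟩, hn⟩ := h
      simp only [Prod.mk.injEq]
      refine ⟨?_, ?_, ?_⟩
      · rcases Bool.or_eq_true_iff.mp hg with h' | h' <;> simp [PySem.Str.isIn] at h' ⊢ <;> simp [h']
      · rcases Bool.or_eq_true_iff.mp hd with h' | h' <;> simp [PySem.Str.isIn] at h' ⊢ <;> simp [h']
      · rcases Bool.or_eq_true_iff.mp hn with h' | h' <;> simp [PySem.Str.isIn] at h' ⊢ <;> simp [h']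
    · rw [ih]; simp [Bool.or_assoc]

theorem get_fallback_suggestions_py_spec' (rc : List String) :
    get_fallback_suggestions_py rc = get_fallback_suggestions_py_alt rc := by
  unfold get_fallback_suggestions_py get_fallback_suggestions_py_alt
  rw [pvFlagLoop_eq]
  cases hg : rc.any (fun c => PySem.Str.isIn "git" c) <;>
  cases hd : rc.any (fun c => PySem.Str.isIn "docker" c) <;>
  cases hn : rc.any (fun c => PySem.Str.isIn "npm" c) <;>
    simp [pvTable, PySem.List.pyGet?, PySem.List.pyIdx?, PySem.List.slice]

-- ===== VERDICT (by name: the statement is the Claim_ definition above) =====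
theorem get_fallback_suggestions_py_spec : Claim_equal_get_fallback_suggestions_py := by
  intro rc _
  exact get_fallback_suggestions_py_spec' rc
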